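-- pv_equiv track=rewrite | github.com/nahimilega/Password-brute-forcing | ronly_passwd_bruteforce.py | z_on_right
-- ===== SOURCE A (Python) =====
-- def z_on_right(string):
-- 	ctr=0
-- 	for i in range( len(string)-1 ,-1,-1):
-- 		if string[i]==last_char:
-- 			ctr+=1
-- 		else:
-- 			break
-- 	return ctr
--
-- last_char='z'
-- ===== SOURCE B (Python) =====
-- def z_on_right(string):
--     return len(string) - len(string.rstrip(last_char))
--
-- last_char = 'z'
-- ===== Notes on version B (the rewrite author's own statement) =====
-- stated objective: simpler
-- what changed: Replaces the explicit reverse index loop with counter and break by a closed-form length difference: len(string) - len(string.rstrip('z')).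
import Mathlib
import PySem

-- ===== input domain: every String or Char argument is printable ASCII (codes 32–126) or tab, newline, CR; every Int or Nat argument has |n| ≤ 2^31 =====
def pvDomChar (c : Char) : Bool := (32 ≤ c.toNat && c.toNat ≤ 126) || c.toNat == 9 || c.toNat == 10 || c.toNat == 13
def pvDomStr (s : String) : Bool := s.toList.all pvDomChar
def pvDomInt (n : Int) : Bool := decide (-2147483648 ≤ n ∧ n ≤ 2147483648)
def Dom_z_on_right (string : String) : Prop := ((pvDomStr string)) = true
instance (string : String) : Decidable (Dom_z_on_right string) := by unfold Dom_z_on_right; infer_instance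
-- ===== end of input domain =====

-- B replaces A's reverse index loop (counter + break) with the closed form
-- len(string) - len(string.rstrip('z')).

-- ===== PORT A =====
-- the loop over range(len(string)-1, -1, -1) with break: structural recursion on the
-- index list; every visited index is in range, so pyGetD with a dummy default is exact
def zLoopA : List Int → List Char → Int → Int
  | [], _, ctr => ctr
  | i :: rest, s, ctr =>
    if PySem.List.pyGetD s i ' ' == 'z' then zLoopA rest s (ctr + 1) else ctr

def z_on_right (string : String) : Int :=
  zLoopA (PySem.List.pyRange ((PySem.Str.len string : Int) - 1) (-1) (-1)) string.toList 0

-- ===== PORT B =====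
-- string.rstrip('z'): PySem has no single-sided strip-with-chars, so ported by hand as
-- dropping 'z' characters from the reversed character list (exact for a one-char strip set)
def rstripZ (s : List Char) : List Char :=
  (s.reverse.dropWhile (· == 'z')).reverse

def z_on_right_alt (string : String) : Int :=
  (PySem.Str.len string : Int) - (rstripZ string.toList).length

-- ===== PRECONDITION & SPEC =====
def Spec_z_on_right (string : String) (out : Int) : Prop := out = z_on_right_alt string
instance (string : String) (out : Int) : Decidable (Spec_z_on_right string out) := by unfold Spec_z_on_right; infer_instance

-- ===== CLAIM (what is proved, stated in full; the proofs are below) =====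
def Claim_equal_z_on_right : Prop := ∀ (string : String), Dom_z_on_right string → Spec_z_on_right string (z_on_right string)

-- ===== LEMMAS AND PROOFS =====

-- A's loop visited characters back-to-front: counting equals takeWhile on the reverse
def zLoopC : List Char → Int → Int
  | [], ctr => ctr
  | c :: rest, ctr => if c == 'z' then zLoopC rest (ctr + 1) else ctr

theorem zLoopC_eq (l : List Char) : ∀ ctr, zLoopC l ctr = ctr + (l.takeWhile (· == 'z')).length := by
  induction l with
  | nil => intro ctr; simp [zLoopC]
  | cons c rest ih =>
    intro ctr
    simp only [zLoopC, List.takeWhile_cons]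
    by_cases h : c = 'z'
    · simp [h, ih]; ring
    · simp [h]

theorem zLoopA_eq (t : List Char) : ∀ (extra : List Char) (ctr : Int),
    zLoopA (PySem.List.pyRange ((t.length : Int) - 1) (-1) (-1)) (t ++ extra) ctr
      = zLoopC t.reverse ctr := by
  induction t using List.reverseRecOn with
  | nil =>
    intro extra ctr
    rw [PySem.List.pyRange_neg_one_eq_nil (by norm_num)]
    simp [zLoopA, zLoopC]
  | append_singleton u c ih =>
    intro extra ctr
    have hlen : (((u ++ [c]).length : Int)) - 1 = (u.length : Int) := by simp
    rw [hlen, PySem.List.pyRange_neg_one_cons (by omega)]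
    have hget : PySem.List.pyGetD (u ++ [c] ++ extra) ((u.length : Int)) ' ' = c := by
      simp [List.getD]
    simp only [zLoopA]
    rw [hget]
    by_cases h : c = 'z'
    · subst h
      simp only [beq_self_eq_true, if_true, List.append_assoc]
      rw [ih (['z'] ++ extra) (ctr + 1)]
      simp [zLoopC]
    · rw [if_neg (by simp [h])]
      simp [zLoopC, h]

theorem z_on_right_spec : Claim_equal_z_on_right := by
  intro string _
  unfold Spec_z_on_right z_on_right z_on_right_alt rstripZ
  have h := zLoopA_eq string.toList [] 0
  simp only [List.append_nil] at h
  simp only [PySem.Str.len_eq] at *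
  rw [h, zLoopC_eq]
  have hsplit := List.takeWhile_append_dropWhile (p := fun c => c == 'z') (l := string.toList.reverse)
  have hlen : (string.toList.reverse.takeWhile (· == 'z')).length
      + (string.toList.reverse.dropWhile (· == 'z')).length = string.toList.length := by
    rw [← List.length_append, hsplit, List.length_reverse]
  simp only [List.length_reverse]
  omega
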